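-- pv_equiv track=rewrite | github.com/Q-Zhao/Data-Science-Projects | 12_tweet_emotional_analysis.py | positive_negative_map
-- ===== SOURCE A (Python) =====
-- def positive_negative_map(score_map):
-- 	p_n_map = {"positive":0, "negative":0, "neutral":0}
-- 	for pair in score_map:
-- 		if pair[0]>0:
-- 			p_n_map["positive"] += pair[1]
-- 		elif pair[0] == 0:
-- 			p_n_map["neutral"] += pair[1]
-- 		else:
-- 			p_n_map["negative"] += pair[1]
-- 	return p_n_map
-- ===== SOURCE B (Python) =====
-- def positive_negative_map(score_map):
--     return {
--         "positive": sum(p[1] for p in score_map if p[0] > 0),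
--         "negative": sum(p[1] for p in score_map if p[0] < 0),
--         "neutral":  sum(p[1] for p in score_map if p[0] == 0),
--     }
-- ===== Notes on version B (the rewrite author's own statement) =====
-- stated objective: simpler
-- what changed: B replaces A's single branching loop over a mutable dict with a direct dict literal built from three independent filtered sums (one per sign class).
import Mathlib
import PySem

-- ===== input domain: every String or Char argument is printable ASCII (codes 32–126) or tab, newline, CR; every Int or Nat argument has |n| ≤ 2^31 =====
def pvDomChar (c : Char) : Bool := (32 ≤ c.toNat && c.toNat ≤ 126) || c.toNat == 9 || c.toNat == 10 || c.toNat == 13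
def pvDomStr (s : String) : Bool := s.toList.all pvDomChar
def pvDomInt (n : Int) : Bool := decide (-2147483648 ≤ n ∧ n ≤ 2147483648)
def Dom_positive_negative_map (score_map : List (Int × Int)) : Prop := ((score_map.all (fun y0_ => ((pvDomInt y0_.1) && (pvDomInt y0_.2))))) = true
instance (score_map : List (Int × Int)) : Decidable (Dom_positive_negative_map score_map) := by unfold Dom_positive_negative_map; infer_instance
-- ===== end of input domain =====

-- B builds the result dict directly from three independent filtered sums instead of A's single branching loop over a mutable dict (objective: simpler).

-- ===== PORT A =====
-- the loop body: p_n_map["positive"/"neutral"/"negative"] += pair[1]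
def pnmStep (d : PySem.Dict String Int) (pair : Int × Int) : PySem.Dict String Int :=
  if pair.1 > 0 then d.insert "positive" (d.getD "positive" 0 + pair.2)
  else if pair.1 == 0 then d.insert "neutral" (d.getD "neutral" 0 + pair.2)
  else d.insert "negative" (d.getD "negative" 0 + pair.2)

def positive_negative_map (score_map : List (Int × Int)) : List (String × Int) :=
  let init : PySem.Dict String Int :=
    ((PySem.Dict.empty.insert "positive" 0).insert "negative" 0).insert "neutral" 0
  (score_map.foldl pnmStep init).items

-- ===== PORT B =====
def positive_negative_map_alt (score_map : List (Int × Int)) : List (String × Int) :=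
  [("positive", ((score_map.filter (fun p => decide (p.1 > 0))).foldl (fun s p => s + p.2) 0)),
   ("negative", ((score_map.filter (fun p => decide (p.1 < 0))).foldl (fun s p => s + p.2) 0)),
   ("neutral",  ((score_map.filter (fun p => p.1 == 0)).foldl (fun s p => s + p.2) 0))]

-- ===== PRECONDITION & SPEC =====
def Spec_positive_negative_map (score_map : List (Int × Int)) (out : List (String × Int)) : Prop := out = positive_negative_map_alt score_map
instance (score_map : List (Int × Int)) (out : List (String × Int)) : Decidable (Spec_positive_negative_map score_map out) := by unfold Spec_positive_negative_map; infer_instance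

-- ===== CLAIM (what is proved, stated in full; the proofs are below) =====
def Claim_equal_positive_negative_map : Prop := ∀ (score_map : List (Int × Int)), Dom_positive_negative_map score_map → Spec_positive_negative_map score_map (positive_negative_map score_map)

-- ===== LEMMAS AND PROOFS =====

theorem pnm_foldl_shift (l : List (Int × Int)) (s : Int) :
    l.foldl (fun a q => a + q.2) s = s + l.foldl (fun a q => a + q.2) 0 := by
  induction l generalizing s with
  | nil => simp
  | cons q t ih =>
    simp only [List.foldl_cons]
    rw [ih (s + q.2), ih (0 + q.2)]
    ring

theorem pnm_loop (l : List (Int × Int)) (p n z : Int) :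
    (l.foldl pnmStep (PySem.Dict.mk [("positive", p), ("negative", n), ("neutral", z)])).items =
    [("positive", p + (l.filter (fun q => decide (q.1 > 0))).foldl (fun a q => a + q.2) 0),
     ("negative", n + (l.filter (fun q => decide (q.1 < 0))).foldl (fun a q => a + q.2) 0),
     ("neutral",  z + (l.filter (fun q => q.1 == 0)).foldl (fun a q => a + q.2) 0)] := by
  induction l generalizing p n z with
  | nil => simp [PySem.Dict.items]
  | cons q t ih =>
    simp only [List.foldl_cons, List.filter_cons]
    have hstep : pnmStep (PySem.Dict.mk [("positive", p), ("negative", n), ("neutral", z)]) q =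
        if q.1 > 0 then PySem.Dict.mk [("positive", p + q.2), ("negative", n), ("neutral", z)]
        else if q.1 == 0 then PySem.Dict.mk [("positive", p), ("negative", n), ("neutral", z + q.2)]
        else PySem.Dict.mk [("positive", p), ("negative", n + q.2), ("neutral", z)] := by
      simp [pnmStep, PySem.Dict.insert, PySem.Dict.getD, PySem.Dict.get?, PySem.Dict.contains]
    rw [hstep]
    by_cases hpos : q.1 > 0
    · have h1 : (decide (q.1 > 0)) = true := by simp [hpos]
      have h2 : (decide (q.1 < 0)) = false := by simp; omega
      have h3 : (q.1 == (0:Int)) = false := by simp; omega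
      rw [if_pos hpos, ih]
      simp only [h1, h2, h3, if_true, if_false, List.foldl_cons]
      rw [pnm_foldl_shift (t.filter (fun q => decide (q.1 > 0))) (0 + q.2)]
      simp only [List.cons.injEq, Prod.mk.injEq, and_true, true_and]
      and_intros <;> first | rfl | ring
    · by_cases hz : q.1 = 0
      · have h1 : (decide (q.1 > 0)) = false := by simp [hpos]
        have h2 : (decide (q.1 < 0)) = false := by simp; omega
        have h3 : (q.1 == (0:Int)) = true := by simp [hz]
        rw [if_neg hpos, if_pos h3, ih]
        simp only [h1, h2, h3, if_true, if_false, List.foldl_cons]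
        rw [pnm_foldl_shift (t.filter (fun q => q.1 == 0)) (0 + q.2)]
        simp only [List.cons.injEq, Prod.mk.injEq, and_true, true_and]
        and_intros <;> first | rfl | ring
      · have hneg : q.1 < 0 := by omega
        have h1 : (decide (q.1 > 0)) = false := by simp [hpos]
        have h2 : (decide (q.1 < 0)) = true := by simp [hneg]
        have h3 : (q.1 == (0:Int)) = false := by simp [hz]
        rw [if_neg hpos, if_neg (by simp [h3] : ¬ (q.1 == (0:Int)) = true), ih]
        simp only [h1, h2, h3, if_true, if_false, List.foldl_cons]
        rw [pnm_foldl_shift (t.filter (fun q => decide (q.1 < 0))) (0 + q.2)]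
        simp only [List.cons.injEq, Prod.mk.injEq, and_true, true_and]
        and_intros <;> first | rfl | ring

-- ===== VERDICT (by name: the statement is the Claim_ definition above) =====
theorem positive_negative_map_spec : Claim_equal_positive_negative_map := by
  intro score_map _
  unfold Spec_positive_negative_map positive_negative_map positive_negative_map_alt
  have hinit : ((PySem.Dict.empty.insert "positive" 0).insert "negative" 0).insert "neutral" (0:Int) =
      PySem.Dict.mk [("positive", 0), ("negative", 0), ("neutral", 0)] := by decide
  simp only [hinit, pnm_loop, zero_add]
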